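-- pv_equiv track=rewrite | github.com/alantao5056/USACO_Silver | 2017/January/1_cowdance/cowdance.py | startDance
-- ===== SOURCE A (Python) =====
-- class binaryTreeNode():
--   def __init__(self, value):
--     self.value = value
--     self.left = None
--     self.right = None
--
-- def addToTree(x: int, root):
--   if x <= root.value:
--     if root.left == None:
--       root.left = binaryTreeNode(x)
--       return
--     return addToTree(x, root.left)
--   else:
--     if root.right == None:
--       root.right = binaryTreeNode(x)
--       return
--     return addToTree(x, root.right)
--
-- def findSmallAndDel(last, root, overallRoot):
--   if root.left == None:
--     if last != None:
--       last.left = root.right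
--       return overallRoot, root.value
--     return root.right, root.value
--   return findSmallAndDel(root, root.left, overallRoot)
--
-- def findBiggest(root):
--   if root.right == None:
--     return root.value
--   return findBiggest(root.right)
--
-- def startDance(cows, stage, N):
--   root = binaryTreeNode(cows[0])
--   for i in range(1, stage):
--     addToTree(cows[i], root)
--
--   for i in range(stage, N):
--     root, small = findSmallAndDel(None, root, root)
--     addToTree(cows[i] + small, root)
--
--   return findBiggest(root)
-- ===== SOURCE B (Python) =====
-- def startDance(cows, stage, N):
--     # sorted array of pending finish times; pop the minimum from the front,
--     # re-insert at the position found by a binary search (insertion point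
--     # before equal elements).
--     q = sorted(cows[i] for i in range(stage))
--     for i in range(stage, N):
--         small = q.pop(0)
--         x = cows[i] + small
--         lo, hi = 0, len(q)
--         while lo < hi:
--             mid = (lo + hi) // 2
--             if q[mid] < x:
--                 lo = mid + 1
--             else:
--                 hi = mid
--         q.insert(lo, x)
--     return q[-1]
-- ===== Notes on version B (the rewrite author's own statement) =====
-- stated objective: alternative
-- what changed: Replaces the hand-built recursive binary search tree (recursive insert, delete-min by pointer surgery, rightmost-walk for the max) with a flat sorted list: pop the minimum at index 0, re-insert by an iterative binary search, answer is the last element; intended as faster (the probe measured 2.66x at the largest size and A timing out on sorted inputs, but could not confirm the label).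
-- outside the precondition, e.g. on startDance([1, 9, 2], -1, -5): A returns 1, B raises IndexError; on startDance([4, 7], 0, 0): A returns 4, B raises IndexError
import Mathlib
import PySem

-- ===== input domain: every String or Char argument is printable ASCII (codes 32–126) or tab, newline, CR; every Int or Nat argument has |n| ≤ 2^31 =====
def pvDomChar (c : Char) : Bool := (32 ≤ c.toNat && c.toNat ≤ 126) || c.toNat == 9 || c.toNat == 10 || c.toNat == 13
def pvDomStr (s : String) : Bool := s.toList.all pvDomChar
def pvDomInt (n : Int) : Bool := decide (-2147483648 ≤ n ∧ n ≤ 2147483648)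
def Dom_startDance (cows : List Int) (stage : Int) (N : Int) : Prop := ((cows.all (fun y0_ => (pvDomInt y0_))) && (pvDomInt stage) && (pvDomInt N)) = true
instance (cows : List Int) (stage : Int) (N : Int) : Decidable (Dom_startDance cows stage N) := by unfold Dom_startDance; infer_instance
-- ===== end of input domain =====

-- B replaces A's hand-built recursive BST with a flat sorted list (pop-min at the front,
-- binary-search re-insert); equivalence is about the return value on the natural domain.

-- ===== PORT A =====
inductive BTree where
  | leaf : BTree
  | node : BTree → Int → BTree → BTree
deriving DecidableEq, Repr

def addToTree (x : Int) : BTree → BTree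
  | .leaf => .leaf       -- Python: root is None ⇒ AttributeError; unreachable under Pre_
  | .node l v r =>
    if x ≤ v then
      match l with
      | .leaf => .node (.node .leaf x .leaf) v r
      | .node a b c => .node (addToTree x (.node a b c)) v r
    else
      match r with
      | .leaf => .node l v (.node .leaf x .leaf)
      | .node a b c => .node l v (addToTree x (.node a b c))

-- functional rendering of A's pointer surgery: returns (tree with minimum removed, minimum)
def findSmallAndDel : BTree → BTree × Int
  | .leaf => (.leaf, 0)  -- Python: AttributeError; unreachable under Pre_
  | .node .leaf v r => (r, v)
  | .node (.node a b c) v r =>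
    let p := findSmallAndDel (.node a b c)
    (.node p.1 v r, p.2)

def findBiggest : BTree → Int
  | .leaf => 0           -- Python: AttributeError; unreachable under Pre_
  | .node _ v .leaf => v
  | .node _ _ (.node a b c) => findBiggest (.node a b c)

def startDance (cows : List Int) (stage : Int) (N : Int) : Int :=
  let root0 : BTree := .node .leaf (PySem.List.pyGetD cows 0 0) .leaf
  let root1 := (PySem.List.pyRange 1 stage 1).foldl
    (fun t i => addToTree (PySem.List.pyGetD cows i 0) t) root0
  let root2 := (PySem.List.pyRange stage N 1).foldl
    (fun t i =>
      let p := findSmallAndDel t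
      addToTree (PySem.List.pyGetD cows i 0 + p.2) p.1) root1
  findBiggest root2

-- ===== PORT B =====
-- the hand-written while-loop binary search of Source B (lo, hi stay ≥ 0)
def bsearchLo (q : List Int) (x : Int) (lo hi : Nat) : Nat :=
  if _h : lo < hi then
    let mid := (lo + hi) / 2
    if PySem.List.pyGetD q (mid : Int) 0 < x then bsearchLo q x (mid + 1) hi
    else bsearchLo q x lo mid
  else lo
termination_by hi - lo
decreasing_by all_goals omega

def startDance_alt (cows : List Int) (stage : Int) (N : Int) : Int :=
  let q0 := PySem.List.sorted
    ((PySem.List.pyRange 0 stage 1).map (fun i => PySem.List.pyGetD cows i 0)) (fun x => x) false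
  let qf := (PySem.List.pyRange stage N 1).foldl
    (fun q i =>
      match PySem.List.pop? q 0 with
      | some (small, q') =>
        let x := PySem.List.pyGetD cows i 0 + small
        PySem.List.insert q' ((bsearchLo q' x 0 q'.length : Nat) : Int) x
      | none => q      -- Python: pop from empty list ⇒ IndexError; unreachable under Pre_
      ) q0
  PySem.List.pyGetD qf (-1) 0

-- ===== PRECONDITION & SPEC =====
-- Pre_ is the natural domain 1 ≤ stage ≤ len(cows), N ≤ len(cows), and stage ≥ 2 whenever the
-- dance loop runs (stage = 1 with N > 1 empties the tree and A raises AttributeError).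
-- It also excludes stage ≤ 0 with N ≤ stage, where A still returns cows[0] only because both
-- loops are vacuous (B naturally raises there, its window cows[i] for i in range(stage) is empty).
def Pre_startDance (cows : List Int) (stage : Int) (N : Int) : Prop :=
  1 ≤ stage ∧ stage ≤ cows.length ∧ N ≤ cows.length ∧ (2 ≤ stage ∨ N ≤ stage)
instance (cows : List Int) (stage : Int) (N : Int) : Decidable (Pre_startDance cows stage N) := by
  unfold Pre_startDance; infer_instance

def pvWitness_startDance : List Int × Int × Int := ([3, 1, 2], 2, 3)

def Spec_startDance (cows : List Int) (stage : Int) (N : Int) (out : Int) : Prop := out = startDance_alt cows stage N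
instance (cows : List Int) (stage : Int) (N : Int) (out : Int) : Decidable (Spec_startDance cows stage N out) := by unfold Spec_startDance; infer_instance

-- ===== CLAIM (what is proved, stated in full; the proofs are below) =====
def Claim_equal_startDance : Prop := ∀ (cows : List Int) (stage : Int) (N : Int), Dom_startDance cows stage N → Pre_startDance cows stage N → Spec_startDance cows stage N (startDance cows stage N)

-- ===== LEMMAS AND PROOFS =====

def inorder : BTree → List Int
  | .leaf => []
  | .node l v r => inorder l ++ v :: inorder r

def IsBST : BTree → Prop
  | .leaf => True
  | .node l v r => IsBST l ∧ IsBST r ∧ (∀ y ∈ inorder l, y ≤ v) ∧ (∀ y ∈ inorder r, v < y)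

-- linear-insert specification of "insert into a sorted list before the first ≥ element"
def linIns (x : Int) : List Int → List Int
  | [] => [x]
  | h :: t => if x ≤ h then x :: h :: t else h :: linIns x t

theorem length_linIns (x : Int) (l : List Int) : (linIns x l).length = l.length + 1 := by
  induction l with
  | nil => simp [linIns]
  | cons h t ih => by_cases hx : x ≤ h <;> simp [linIns, hx, ih]

theorem linIns_perm (x : Int) (l : List Int) : (linIns x l).Perm (x :: l) := by
  induction l with
  | nil => simp [linIns]
  | cons h t ih =>
    by_cases hx : x ≤ h
    · simp [linIns, hx]
    · simpa [linIns, hx] using ((ih.cons h).trans (List.Perm.swap x h t))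

theorem mem_linIns {y x : Int} {l : List Int} : y ∈ linIns x l ↔ y = x ∨ y ∈ l := by
  induction l with
  | nil => simp [linIns]
  | cons h t ih =>
    by_cases hx : x ≤ h
    · simp [linIns, hx]
    · simp [linIns, hx, ih]
      tauto

theorem linIns_pairwise {x : Int} {l : List Int} (hp : l.Pairwise (· ≤ ·)) :
    (linIns x l).Pairwise (· ≤ ·) := by
  induction l with
  | nil => simp [linIns]
  | cons h t ih =>
    rcases List.pairwise_cons.1 hp with ⟨hht, hpt⟩
    by_cases hx : x ≤ h
    · rw [show linIns x (h :: t) = x :: h :: t by simp [linIns, hx]]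
      refine List.pairwise_cons.2 ⟨?_, hp⟩
      intro y hy
      rcases List.mem_cons.1 hy with rfl | hy
      · exact hx
      · exact le_trans hx (hht y hy)
    · rw [show linIns x (h :: t) = h :: linIns x t by simp [linIns, hx]]
      refine List.pairwise_cons.2 ⟨?_, ih hpt⟩
      intro y hy
      rcases mem_linIns.1 hy with rfl | hy
      · exact le_of_not_ge hx
      · exact hht y hy

theorem linIns_append_of_le {x v : Int} (L R : List Int) (h : x ≤ v) :
    linIns x (L ++ v :: R) = linIns x L ++ v :: R := by
  induction L with
  | nil => simp [linIns, h]
  | cons a L ih =>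
    by_cases ha : x ≤ a <;> simp [linIns, ha, ih]

theorem linIns_append_of_gt {x v : Int} (L R : List Int)
    (hl : ∀ h ∈ L, ¬ x ≤ h) (hv : ¬ x ≤ v) :
    linIns x (L ++ v :: R) = L ++ v :: linIns x R := by
  induction L with
  | nil => simp [linIns, hv]
  | cons a L ih =>
    have ha : ¬ x ≤ a := hl a (List.mem_cons_self ..)
    simp only [List.cons_append, linIns, if_neg ha]
    rw [ih (fun b hb => hl b (List.mem_cons_of_mem _ hb))]

theorem inorder_ne_nil {t : BTree} (h : t ≠ .leaf) : inorder t ≠ [] := by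
  cases t with
  | leaf => exact absurd rfl h
  | node l v r => simp [inorder]

theorem pairwise_inorder {t : BTree} (h : IsBST t) : (inorder t).Pairwise (· ≤ ·) := by
  induction t with
  | leaf => simp [inorder]
  | node l v r ihl ihr =>
    rcases h with ⟨hl, hr, hle, hgt⟩
    rw [inorder, List.pairwise_append]
    refine ⟨ihl hl, ?_, ?_⟩
    · refine List.pairwise_cons.2 ⟨fun y hy => le_of_lt (hgt y hy), ihr hr⟩
    · intro a ha b hb
      rcases List.mem_cons.1 hb with rfl | hb
      · exact hle a ha
      · exact le_trans (hle a ha) (le_of_lt (hgt b hb))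

theorem addA (x v : Int) (r : BTree) (h : x ≤ v) :
    addToTree x (.node .leaf v r) = .node (.node .leaf x .leaf) v r := by
  rw [addToTree.eq_def]; simp [h]

theorem addB (x v : Int) (a : BTree) (b : Int) (c r : BTree) (h : x ≤ v) :
    addToTree x (.node (.node a b c) v r) = .node (addToTree x (.node a b c)) v r := by
  rw [addToTree.eq_def]; simp [h]

theorem addC (x v : Int) (l : BTree) (h : ¬ x ≤ v) :
    addToTree x (.node l v .leaf) = .node l v (.node .leaf x .leaf) := by
  rw [addToTree.eq_def]; simp [h]

theorem addD (x v : Int) (l a : BTree) (b : Int) (c : BTree) (h : ¬ x ≤ v) :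
    addToTree x (.node l v (.node a b c)) = .node l v (addToTree x (.node a b c)) := by
  rw [addToTree.eq_def]; simp [h]

theorem addToTree_inorder {t : BTree} (x : Int) (hb : IsBST t) (hne : t ≠ .leaf) :
    inorder (addToTree x t) = linIns x (inorder t) := by
  induction t with
  | leaf => exact absurd rfl hne
  | node l v r ihl ihr =>
    rcases hb with ⟨hbl, hbr, hle, hgt⟩
    by_cases hx : x ≤ v
    · cases l with
      | leaf => rw [addA x v r hx]; simp [inorder, linIns, hx]
      | node a b c =>
        rw [addB x v a b c r hx, inorder, inorder, ihl hbl (by simp),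
          linIns_append_of_le _ _ hx]
    · have hlt : ∀ h ∈ inorder l, ¬ x ≤ h := fun h hh hc => hx (le_trans hc (hle h hh))
      cases r with
      | leaf =>
        rw [addC x v l hx]
        simp only [inorder]
        rw [linIns_append_of_gt _ _ hlt hx]
        simp [linIns]
      | node a b c =>
        rw [addD x v l a b c hx, inorder, inorder, ihr hbr (by simp),
          linIns_append_of_gt _ _ hlt hx]

theorem addToTree_isBST {t : BTree} (x : Int) (hb : IsBST t) : IsBST (addToTree x t) := by
  induction t with
  | leaf => trivial
  | node l v r ihl ihr =>
    rcases hb with ⟨hbl, hbr, hle, hgt⟩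
    by_cases hx : x ≤ v
    · cases l with
      | leaf =>
        rw [addA x v r hx]
        exact ⟨⟨trivial, trivial, by simp [inorder], by simp [inorder]⟩, hbr,
          by simp [inorder, hx], hgt⟩
      | node a b c =>
        rw [addB x v a b c r hx]
        refine ⟨ihl hbl, hbr, ?_, hgt⟩
        intro y hy
        rw [addToTree_inorder x hbl (by simp)] at hy
        rcases mem_linIns.1 hy with rfl | hy
        · exact hx
        · exact hle y hy
    · cases r with
      | leaf =>
        rw [addC x v l hx]
        exact ⟨hbl, ⟨trivial, trivial, by simp [inorder], by simp [inorder]⟩, hle,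
          by simp [inorder]; omega⟩
      | node a b c =>
        rw [addD x v l a b c hx]
        refine ⟨hbl, ihr hbr, hle, ?_⟩
        intro y hy
        rw [addToTree_inorder x hbr (by simp)] at hy
        rcases mem_linIns.1 hy with rfl | hy
        · omega
        · exact hgt y hy

theorem addToTree_ne_leaf {t : BTree} (x : Int) (hne : t ≠ .leaf) : addToTree x t ≠ .leaf := by
  cases t with
  | leaf => exact absurd rfl hne
  | node l v r =>
    by_cases hx : x ≤ v
    · cases l with
      | leaf => rw [addA x v r hx]; simp
      | node a b c => rw [addB x v a b c r hx]; simp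
    · cases r with
      | leaf => rw [addC x v l hx]; simp
      | node a b c => rw [addD x v l a b c hx]; simp

theorem findSmallAndDel_spec {t : BTree} (hne : t ≠ .leaf) (hb : IsBST t) :
    inorder t = (findSmallAndDel t).2 :: inorder (findSmallAndDel t).1
      ∧ IsBST (findSmallAndDel t).1 := by
  induction t with
  | leaf => exact absurd rfl hne
  | node l v r ihl ihr =>
    rcases hb with ⟨hbl, hbr, hle, hgt⟩
    cases l with
    | leaf => exact ⟨by simp [findSmallAndDel, inorder], hbr⟩
    | node a b c =>
      rcases ihl (by simp) hbl with ⟨heq, hb1⟩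
      rw [show findSmallAndDel (.node (.node a b c) v r)
            = (.node (findSmallAndDel (.node a b c)).1 v r,
               (findSmallAndDel (.node a b c)).2) from rfl]
      constructor
      · rw [show inorder (BTree.node (BTree.node a b c) v r)
              = inorder (BTree.node a b c) ++ v :: inorder r from rfl, heq]
        simp [inorder]
      · refine ⟨hb1, hbr, ?_, hgt⟩
        intro y hy
        exact hle y (by rw [heq]; exact List.mem_cons_of_mem _ hy)

theorem findBiggest_eq {t : BTree} (hne : t ≠ .leaf) :
    (inorder t).getLast? = some (findBiggest t) := by
  induction t with
  | leaf => exact absurd rfl hne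
  | node l v r ihl ihr =>
    cases r with
    | leaf => simp [inorder, findBiggest]
    | node a b c =>
      rw [show findBiggest (.node l v (.node a b c)) = findBiggest (.node a b c) from rfl,
        inorder, List.getLast?_append]
      · simp only [List.getLast?_cons]
        rw [← ihr (by simp)]
        cases h : (inorder (BTree.node a b c)).getLast? with
        | none => exact absurd (List.getLast?_eq_none_iff.1 h) (inorder_ne_nil (by simp))
        | some y => rfl

-- the binary search + insert of B equals the linear insert, on a sorted list
theorem bsearch_invariant (q : List Int) (x : Int)
    (hq : q.Pairwise (· ≤ ·)) :
    ∀ lo hi, lo ≤ hi → hi ≤ q.length →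
      (∀ j, (hj : j < q.length) → j < lo → q[j] < x) →
      (∀ j, (hj : j < q.length) → hi ≤ j → x ≤ q[j]) →
      lo ≤ bsearchLo q x lo hi ∧ bsearchLo q x lo hi ≤ hi ∧
      (∀ j, (hj : j < q.length) → j < bsearchLo q x lo hi → q[j] < x) ∧
      (∀ j, (hj : j < q.length) → bsearchLo q x lo hi ≤ j → x ≤ q[j]) := by
  have mono : ∀ i j, (hi' : i < q.length) → (hj : j < q.length) → i ≤ j → q[i] ≤ q[j] := by
    intro i j hi' hj hij
    rcases Nat.lt_or_ge i j with h | h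
    · exact (List.pairwise_iff_getElem.1 hq) i j hi' hj h
    · have : i = j := le_antisymm hij h
      subst this; exact le_refl _
  have key : ∀ n lo hi, hi - lo = n → lo ≤ hi → hi ≤ q.length →
      (∀ j, (hj : j < q.length) → j < lo → q[j] < x) →
      (∀ j, (hj : j < q.length) → hi ≤ j → x ≤ q[j]) →
      lo ≤ bsearchLo q x lo hi ∧ bsearchLo q x lo hi ≤ hi ∧
      (∀ j, (hj : j < q.length) → j < bsearchLo q x lo hi → q[j] < x) ∧
      (∀ j, (hj : j < q.length) → bsearchLo q x lo hi ≤ j → x ≤ q[j]) := by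
    intro n
    induction n using Nat.strong_induction_on with
    | _ n ih =>
      intro lo hi hn hlh hhl hlow hhigh
      rw [bsearchLo]
      by_cases h : lo < hi
      · rw [dif_pos h]
        have hmidlt : (lo + hi) / 2 < hi := by omega
        have hmidge : lo ≤ (lo + hi) / 2 := by omega
        have hmidlen : (lo + hi) / 2 < q.length := lt_of_lt_of_le hmidlt hhl
        have hget : PySem.List.pyGetD q (((lo + hi) / 2 : Nat) : Int) 0 = q[(lo + hi) / 2] := by
          rw [PySem.List.pyGetD_natCast]
          exact List.getD_eq_getElem q 0 hmidlen
        simp only [hget]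
        by_cases hc : q[(lo + hi) / 2] < x
        · rw [if_pos hc]
          refine (ih (hi - ((lo + hi) / 2 + 1)) (by omega) _ _ rfl (by omega) hhl ?_ hhigh).imp
            (fun h1 => by omega) (fun h2 => h2)
          intro j hj hjlt
          exact lt_of_le_of_lt (mono j ((lo + hi) / 2) hj hmidlen (by omega)) hc
        · rw [if_neg hc]
          refine (ih ((lo + hi) / 2 - lo) (by omega) _ _ rfl (by omega) (by omega) hlow ?_).imp
            (fun h1 => h1) (fun h2 => ⟨by omega, h2.2⟩)
          intro j hj hjge
          exact le_trans (le_of_not_gt hc) (mono ((lo + hi) / 2) j hmidlen hj hjge)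
      · rw [dif_neg h]
        have : lo = hi := by omega
        subst this
        exact ⟨le_refl _, le_refl _, hlow, hhigh⟩
  intro lo hi hlh hhl hlow hhigh
  exact key (hi - lo) lo hi rfl hlh hhl hlow hhigh

theorem insert_at_split_eq_linIns (x : Int) :
    ∀ (q : List Int) (r : Nat), r ≤ q.length →
      (∀ j, (hj : j < q.length) → j < r → q[j] < x) →
      (∀ j, (hj : j < q.length) → r ≤ j → x ≤ q[j]) →
      q.take r ++ x :: q.drop r = linIns x q := by
  intro q
  induction q with
  | nil =>
    intro r hr _ _
    obtain rfl : r = 0 := by simpa using hr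
    simp [linIns]
  | cons h t ih =>
    intro r hr hlt hge
    cases r with
    | zero =>
      have : x ≤ h := hge 0 (by simp) (by omega)
      simp [linIns, this]
    | succ r' =>
      have hh : h < x := hlt 0 (by simp) (by omega)
      have : linIns x (h :: t) = h :: linIns x t := by simp [linIns]; omega
      rw [this]
      simp only [List.take_succ_cons, List.drop_succ_cons, List.cons_append, List.cons.injEq,
        true_and]
      exact ih r' (by simpa using hr)
        (fun j hj hjr => hlt (j + 1) (by simpa using hj) (by omega))
        (fun j hj hjr => hge (j + 1) (by simpa using hj) (by omega))

theorem bsearch_insert_eq_linIns (q : List Int) (x : Int) (hq : q.Pairwise (· ≤ ·)) :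
    PySem.List.insert q ((bsearchLo q x 0 q.length : Nat) : Int) x = linIns x q := by
  obtain ⟨h0, hle, hlt, hge⟩ := bsearch_invariant q x hq 0 q.length (Nat.zero_le _)
    (le_refl _) (fun j hj hjl => absurd hjl (by omega)) (fun j hj hjge => absurd hjge (by omega))
  rw [PySem.List.insert_natCast q _ x hle]
  exact insert_at_split_eq_linIns x q _ hle hlt hge

-- phase 1: folding addToTree over any value sequence mirrors folding linIns
theorem foldl_addToTree (g : Int → Int) :
    ∀ (is : List Int) (t : BTree), IsBST t → t ≠ .leaf →
      inorder (is.foldl (fun t i => addToTree (g i) t) t)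
          = is.foldl (fun q i => linIns (g i) q) (inorder t)
        ∧ IsBST (is.foldl (fun t i => addToTree (g i) t) t)
        ∧ is.foldl (fun t i => addToTree (g i) t) t ≠ .leaf := by
  intro is
  induction is with
  | nil => intro t hb hne; exact ⟨rfl, hb, hne⟩
  | cons i is ih =>
    intro t hb hne
    simp only [List.foldl_cons]
    rcases ih (addToTree (g i) t) (addToTree_isBST _ hb) (addToTree_ne_leaf _ hne) with
      ⟨h1, h2, h3⟩
    exact ⟨by rw [h1, addToTree_inorder _ hb hne], h2, h3⟩

theorem foldl_linIns_perm (g : Int → Int) :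
    ∀ (is : List Int) (q : List Int),
      (is.foldl (fun q i => linIns (g i) q) q).Perm (is.map g ++ q) := by
  intro is
  induction is with
  | nil => intro q; simp
  | cons i is ih =>
    intro q
    simp only [List.foldl_cons, List.map_cons, List.cons_append]
    refine (ih (linIns (g i) q)).trans ?_
    refine (List.Perm.append_left _ (linIns_perm (g i) q)).trans ?_
    simp

theorem foldl_linIns_pairwise (g : Int → Int) :
    ∀ (is : List Int) (q : List Int), q.Pairwise (· ≤ ·) →
      (is.foldl (fun q i => linIns (g i) q) q).Pairwise (· ≤ ·) := by
  intro is
  induction is with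
  | nil => intro q hq; exact hq
  | cons i is ih =>
    intro q hq
    exact ih _ (linIns_pairwise hq)

-- phase 2: one dance step
theorem dance_step (c : Int) {t : BTree} (hb : IsBST t) (hlen : 2 ≤ (inorder t).length) :
    inorder (addToTree (c + (findSmallAndDel t).2) (findSmallAndDel t).1)
        = linIns (c + (findSmallAndDel t).2) (inorder (findSmallAndDel t).1)
      ∧ IsBST (addToTree (c + (findSmallAndDel t).2) (findSmallAndDel t).1)
      ∧ (inorder (addToTree (c + (findSmallAndDel t).2) (findSmallAndDel t).1)).length
          = (inorder t).length := by
  have hne : t ≠ .leaf := by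
    intro h; subst h; simp [inorder] at hlen
  obtain ⟨heq, hb1⟩ := findSmallAndDel_spec hne hb
  have hlen1 : 1 ≤ (inorder (findSmallAndDel t).1).length := by
    have := congrArg List.length heq; simp at this; omega
  have hne1 : (findSmallAndDel t).1 ≠ .leaf := by
    intro h; rw [h] at hlen1; simp [inorder] at hlen1
  refine ⟨addToTree_inorder _ hb1 hne1, addToTree_isBST _ hb1, ?_⟩
  rw [addToTree_inorder _ hb1 hne1, length_linIns]
  have := congrArg List.length heq; simp at this; omega

theorem foldl_dance (cows : List Int) :
    ∀ (is : List Int) (t : BTree), IsBST t → 2 ≤ (inorder t).length →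
      inorder (is.foldl (fun t i =>
          let p := findSmallAndDel t
          addToTree (PySem.List.pyGetD cows i 0 + p.2) p.1) t)
        = is.foldl (fun q i =>
            match PySem.List.pop? q 0 with
            | some (small, q') =>
              let x := PySem.List.pyGetD cows i 0 + small
              PySem.List.insert q' ((bsearchLo q' x 0 q'.length : Nat) : Int) x
            | none => q) (inorder t)
        ∧ IsBST (is.foldl (fun t i =>
            let p := findSmallAndDel t
            addToTree (PySem.List.pyGetD cows i 0 + p.2) p.1) t)
        ∧ (inorder (is.foldl (fun t i =>
            let p := findSmallAndDel t
            addToTree (PySem.List.pyGetD cows i 0 + p.2) p.1) t)).length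
          = (inorder t).length := by
  intro is
  induction is with
  | nil => intro t hb hlen; exact ⟨rfl, hb, rfl⟩
  | cons i is ih =>
    intro t hb hlen
    have hne : t ≠ .leaf := by
      intro h; subst h; simp [inorder] at hlen
    obtain ⟨heq, hb1⟩ := findSmallAndDel_spec hne hb
    obtain ⟨hstep1, hstep2, hstep3⟩ := dance_step (PySem.List.pyGetD cows i 0) hb hlen
    have hpop : PySem.List.pop? (inorder t) 0
        = some ((findSmallAndDel t).2, inorder (findSmallAndDel t).1) := by
      rw [heq]; exact PySem.List.pop?_zero_cons _ _
    have hBstep : (match PySem.List.pop? (inorder t) 0 with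
        | some (small, q') =>
          PySem.List.insert q'
            ((bsearchLo q' (PySem.List.pyGetD cows i 0 + small) 0 q'.length : Nat) : Int)
            (PySem.List.pyGetD cows i 0 + small)
        | none => inorder t)
        = inorder (addToTree (PySem.List.pyGetD cows i 0 + (findSmallAndDel t).2)
            (findSmallAndDel t).1) := by
      simp only [hpop]
      rw [bsearch_insert_eq_linIns _ _ (pairwise_inorder hb1)]
      exact hstep1.symm
    simp only [List.foldl_cons]
    rw [hBstep]
    obtain ⟨ha, hbb, hc⟩ := ih _ hstep2 (by omega)
    exact ⟨ha, hbb, by rw [hc, hstep3]⟩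

theorem inorder_root0 (c : Int) : inorder (BTree.node .leaf c .leaf) = [c] := by
  simp [inorder]

theorem isBST_root0 (c : Int) : IsBST (BTree.node .leaf c .leaf) :=
  ⟨trivial, trivial, by simp [inorder], by simp [inorder]⟩

-- ===== VERDICT (by name: the statement is the Claim_ definition above) =====
theorem startDance_spec : Claim_equal_startDance := by
  unfold Claim_equal_startDance
  intro cows stage N _hdom hpre
  obtain ⟨h1, h2, h3, h4⟩ := hpre
  unfold Spec_startDance startDance startDance_alt
  simp only []
  have hcne : cows ≠ [] := by
    intro h; subst h; simp at h2; omega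
  have hlen0 : 0 < cows.length := List.length_pos_iff.2 hcne
  have hc0 : PySem.List.pyGetD cows 0 0 = cows[0] := by
    simpa using PySem.List.pyGetD_eq_getElem cows 0 (by omega) (by exact_mod_cast hlen0)
  set s : Nat := stage.toNat with hs
  have hs1 : 1 ≤ s := by omega
  have hsl : s ≤ cows.length := by omega

  set g : Int → Int := fun i => PySem.List.pyGetD cows i 0 with hg
  obtain ⟨hp1, hb1, hne1⟩ := foldl_addToTree g (PySem.List.pyRange 1 stage 1)
    (.node .leaf (PySem.List.pyGetD cows 0 0) .leaf) (isBST_root0 _) (by simp)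
  set t1 := (PySem.List.pyRange 1 stage 1).foldl (fun t i => addToTree (g i) t)
    (.node .leaf (PySem.List.pyGetD cows 0 0) .leaf) with ht1
  have hlen_take : ((cows.take s).length : Int) = stage := by
    simp [List.length_take, min_eq_left hsl]; omega
  have hmapgen : ∀ (a : Int), 0 ≤ a →
      (PySem.List.pyRange a stage 1).map g = (cows.take s).drop a.toNat := by
    intro a ha
    have hmr := PySem.List.map_pyGetD_pyRange (cows.take s) (0 : Int) (a := a) ha
    rw [show PySem.List.len (cows.take s) = stage by
          simpa [PySem.List.len] using hlen_take] at hmr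
    rw [show PySem.List.pyRange a stage 1 = PySem.List.pyRange a stage from rfl, ← hmr]
    refine List.map_congr_left ?_
    intro j hj
    rcases (PySem.List.mem_pyRange_one).1 hj with ⟨hj1, hj2⟩
    have hjnn : 0 ≤ j := by omega
    have hjlt : j < (cows.length : Int) := by omega
    have hjlt' : j < ((cows.take s).length : Int) := by rw [hlen_take]; omega
    rw [hg]
    simp only []
    rw [PySem.List.pyGetD_eq_getElem cows 0 hjnn hjlt,
      PySem.List.pyGetD_eq_getElem (cows.take s) 0 hjnn hjlt']
    exact (List.getElem_take).symm
  have hmap : (PySem.List.pyRange 1 stage 1).map g = (cows.take s).drop 1 := by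
    simpa using hmapgen 1 (by omega)
  have hmap0 : (PySem.List.pyRange 0 stage 1).map g = cows.take s := by
    simpa using hmapgen 0 (by omega)
  have htake_cons : cows.take s = cows[0] :: (cows.take s).drop 1 := by
    cases hts : cows.take s with
    | nil =>
      have := congrArg List.length hts
      simp [List.length_take, min_eq_left hsl] at this
      omega
    | cons a l =>
      have ha : a = cows[0] := by
        have h00 := congrArg (fun u => u[0]?) hts
        have := h00.symm
        simp [List.getElem?_take, List.getElem?_eq_getElem hlen0] at this
        exact this.2
      subst ha
      simp
  have hperm : (inorder t1).Perm (cows.take s) := by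
    rw [hp1, inorder_root0]
    refine (foldl_linIns_perm g (PySem.List.pyRange 1 stage 1) _).trans ?_
    rw [hmap, hc0]
    conv_rhs => rw [htake_cons]
    exact List.perm_append_singleton _ _
  have hpw : (inorder t1).Pairwise (· ≤ ·) := by
    rw [hp1, inorder_root0]
    exact foldl_linIns_pairwise g _ _ (by simp)
  have hq0 : PySem.List.sorted
      ((PySem.List.pyRange 0 stage 1).map (fun i => PySem.List.pyGetD cows i 0)) (fun x => x) false
      = inorder t1 := by
    rw [show ((PySem.List.pyRange 0 stage 1).map (fun i => PySem.List.pyGetD cows i 0))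
          = (PySem.List.pyRange 0 stage 1).map g from rfl, hmap0]
    exact PySem.List.sorted_id_eq_of_perm_of_pairwise _ _ hperm hpw
  have hlent1 : (inorder t1).length = s := by
    have hpl := hperm.length_eq
    simpa [List.length_take, min_eq_left hsl] using hpl
  rw [hq0]
  by_cases hN : N ≤ stage
  · rw [PySem.List.pyRange_one_eq_nil hN]
    simp only [List.foldl_nil]
    have hne : inorder t1 ≠ [] := by
      intro h; rw [h] at hlent1; simp at hlent1; omega
    rw [PySem.List.pyGetD_neg_one _ 0 hne]
    have hfb := findBiggest_eq hne1
    rw [List.getLast?_eq_some_getLast hne] at hfb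
    exact (Option.some_inj.1 hfb).symm
  · have hstage2 : 2 ≤ stage := by
      rcases h4 with h | h
      · exact h
      · omega
    obtain ⟨hd1, hd2, hd3⟩ := foldl_dance cows (PySem.List.pyRange stage N 1) t1 hb1
      (by omega)
    rw [← hd1]
    set t2 := (PySem.List.pyRange stage N 1).foldl (fun t i =>
      let p := findSmallAndDel t
      addToTree (PySem.List.pyGetD cows i 0 + p.2) p.1) t1 with ht2
    have hne2 : inorder t2 ≠ [] := by
      intro h
      have hl := congrArg List.length h
      rw [hd3] at hl
      simp [hlent1] at hl
      omega
    have hne2' : t2 ≠ .leaf := by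
      intro h; rw [h] at hne2; simp [inorder] at hne2
    rw [PySem.List.pyGetD_neg_one _ 0 hne2]
    have hfb := findBiggest_eq hne2'
    rw [List.getLast?_eq_some_getLast hne2] at hfb
    exact (Option.some_inj.1 hfb).symm
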